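-- pv_equiv track=rewrite | github.com/Jayleonc/forma | src/forma/conversion/processors/xlsx.py | _max_populated_col
-- ===== SOURCE A (Python) =====
-- def _max_populated_col(rows: list[tuple[object, ...]]) -> int:
--     max_col = 0
--     for row in rows:
--         for i in range(len(row) - 1, -1, -1):
--             if row[i] is not None:
--                 max_col = max(max_col, i + 1)
--                 break
--     return max_col
-- ===== SOURCE B (Python) =====
-- def _max_populated_col(rows: list[tuple[object, ...]]) -> int:
--     maxw = max((len(row) for row in rows), default=0)
--     for col in range(maxw - 1, -1, -1):
--         if any(len(row) > col and row[col] is not None for row in rows):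
--             return col + 1
--     return 0
-- ===== Notes on version B (the rewrite author's own statement) =====
-- stated objective: alternative
-- what changed: Replaced A's row-major fold (per-row backward scan updating a running max) by a column-major search: compute the maximum row width, then scan columns right-to-left and return col+1 for the first column populated in any row.
import Mathlib
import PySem

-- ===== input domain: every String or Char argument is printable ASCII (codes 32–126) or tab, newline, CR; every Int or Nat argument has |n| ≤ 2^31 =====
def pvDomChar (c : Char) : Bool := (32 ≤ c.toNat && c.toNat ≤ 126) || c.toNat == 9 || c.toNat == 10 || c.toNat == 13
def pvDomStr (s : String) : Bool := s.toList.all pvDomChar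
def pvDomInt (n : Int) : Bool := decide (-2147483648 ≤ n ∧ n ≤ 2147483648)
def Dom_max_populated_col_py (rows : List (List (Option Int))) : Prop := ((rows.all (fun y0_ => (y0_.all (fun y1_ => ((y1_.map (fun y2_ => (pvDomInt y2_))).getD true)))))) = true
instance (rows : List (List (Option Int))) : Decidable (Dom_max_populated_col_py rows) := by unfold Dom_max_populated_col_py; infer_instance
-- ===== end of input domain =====

-- B is an alternative column-major scan of the same cost; return values proved equal on all inputs.

-- ===== PORT A =====
-- inner 'for i in range(len(row)-1, -1, -1): if row[i] is not None: max_col = max(max_col, i+1); break'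
-- k counts down from len(row); k = i+1, so row[i] = row.getD (k-1) none
def pvBackA (row : List (Option Int)) : Nat → Int → Int
  | 0, m => m
  | k + 1, m => if (row.getD k none).isSome then max m ((k : Int) + 1) else pvBackA row k m

def max_populated_col_py (rows : List (List (Option Int))) : Int :=
  rows.foldl (fun max_col row => pvBackA row row.length max_col) 0

-- ===== PORT B =====
-- 'any(len(row) > col and row[col] is not None for row in rows)'
def pvPopB (rows : List (List (Option Int))) (col : Nat) : Bool :=
  rows.any (fun row => decide (col < row.length) && (row.getD col none).isSome)

-- 'for col in range(maxw - 1, -1, -1): if …: return col + 1' / 'return 0'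
def pvDownB (rows : List (List (Option Int))) : Nat → Int
  | 0 => 0
  | c + 1 => if pvPopB rows c then (c : Int) + 1 else pvDownB rows c

def max_populated_col_py_alt (rows : List (List (Option Int))) : Int :=
  pvDownB rows (rows.foldl (fun w row => max w row.length) 0)

-- ===== PRECONDITION & SPEC =====
def Spec_max_populated_col_py (rows : List (List (Option Int))) (out : Int) : Prop := out = max_populated_col_py_alt rows
instance (rows : List (List (Option Int))) (out : Int) : Decidable (Spec_max_populated_col_py rows out) := by unfold Spec_max_populated_col_py; infer_instance

-- ===== CLAIM (what is proved, stated in full; the proofs are below) =====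
def Claim_equal_max_populated_col_py : Prop := ∀ (rows : List (List (Option Int))), Dom_max_populated_col_py rows → Spec_max_populated_col_py rows (max_populated_col_py rows)

-- ===== LEMMAS AND PROOFS =====

theorem pvDownB_nonneg (rows : List (List (Option Int))) (n : Nat) : 0 ≤ pvDownB rows n := by
  induction n with
  | zero => simp [pvDownB]
  | succ c ih => simp only [pvDownB]; split <;> [positivity; exact ih]

theorem pvDownB_le (rows : List (List (Option Int))) (n : Nat) : pvDownB rows n ≤ (n : Int) := by
  induction n with
  | zero => simp [pvDownB]
  | succ c ih =>
    simp only [pvDownB]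
    split
    · push_cast; omega
    · have : (c : Int) ≤ (c : Int) + 1 := by omega
      calc pvDownB rows c ≤ (c : Int) := ih
        _ ≤ ((c + 1 : Nat) : Int) := by push_cast; omega

-- A's per-row backward scan equals B's column scan of the singleton row list
theorem pvBackA_eq (row : List (Option Int)) (k : Nat) (m : Int) (hk : k ≤ row.length)
    (hm : 0 ≤ m) : pvBackA row k m = max m (pvDownB [row] k) := by
  induction k with
  | zero => simp [pvBackA, pvDownB]; omega
  | succ c ih =>
    have hc : c < row.length := hk
    simp only [pvBackA, pvDownB, pvPopB, List.any_cons, List.any_nil, Bool.or_false]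
    have : (decide (c < row.length) && (row.getD c none).isSome) = (row.getD c none).isSome := by
      simp [hc]
    rw [this]
    split
    · rfl
    · exact ih (Nat.le_of_lt hc)

theorem pvPopB_cons (r : List (Option Int)) (rs : List (List (Option Int))) (c : Nat) :
    pvPopB (r :: rs) c = (pvPopB [r] c || pvPopB rs c) := by
  simp [pvPopB]

theorem pvDownB_cons (r : List (Option Int)) (rs : List (List (Option Int))) (n : Nat) :
    pvDownB (r :: rs) n = max (pvDownB [r] n) (pvDownB rs n) := by
  induction n with
  | zero => simp [pvDownB]
  | succ c ih =>
    simp only [pvDownB]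
    rw [pvPopB_cons]
    have hl := pvDownB_le [r] c
    have hr := pvDownB_le rs c
    rcases h1 : pvPopB [r] c <;> rcases h2 : pvPopB rs c <;> simp [h1, h2, ih] <;> omega

theorem pvDownB_ext (rows : List (List (Option Int))) (m : Nat)
    (h : ∀ c, m ≤ c → pvPopB rows c = false) :
    ∀ n, m ≤ n → pvDownB rows n = pvDownB rows m := by
  intro n
  induction n with
  | zero => intro h0; have : m = 0 := by omega
            rw [this]
  | succ c ih =>
    intro hmn
    rcases Nat.eq_or_lt_of_le hmn with he | hl
    · rw [he]
    · have hm : m ≤ c := by omega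
      simp only [pvDownB, h c hm]
      exact ih hm

theorem pvPopB_false_of_short (rows : List (List (Option Int))) (c : Nat)
    (h : ∀ row ∈ rows, row.length ≤ c) : pvPopB rows c = false := by
  simp only [pvPopB, List.any_eq_false]
  intro row hr
  simp [Nat.not_lt.mpr (h row hr)]

theorem pvMaxw_acc (rows : List (List (Option Int))) (a : Nat) :
    rows.foldl (fun w row => max w row.length) a
      = max a (rows.foldl (fun w row => max w row.length) 0) := by
  induction rows generalizing a with
  | nil => simp
  | cons r rs ih =>
    simp only [List.foldl_cons]
    rw [ih (max a r.length), ih (max 0 r.length)]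
    omega

theorem pvLen_le_maxw (rows : List (List (Option Int))) (row : List (Option Int))
    (h : row ∈ rows) : row.length ≤ rows.foldl (fun w r => max w r.length) 0 := by
  induction rows with
  | nil => simp at h
  | cons r rs ih =>
    simp only [List.foldl_cons]
    rw [pvMaxw_acc]
    rcases List.mem_cons.mp h with he | hm
    · subst he; omega
    · have := ih hm; omega

theorem pvMain (rows : List (List (Option Int))) (m : Int) (hm : 0 ≤ m) :
    rows.foldl (fun max_col row => pvBackA row row.length max_col) m
      = max m (max_populated_col_py_alt rows) := by
  induction rows generalizing m with
  | nil => simp [max_populated_col_py_alt, pvDownB]; omega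
  | cons r rs ih =>
    simp only [List.foldl_cons]
    have hb : pvBackA r r.length m = max m (pvDownB [r] r.length) :=
      pvBackA_eq r r.length m le_rfl hm
    have hb0 : 0 ≤ pvBackA r r.length m := by
      rw [hb]; have := pvDownB_nonneg [r] r.length; omega
    rw [ih _ hb0, hb]
    -- unfold both alt values and split into cons pieces
    simp only [max_populated_col_py_alt, List.foldl_cons]
    rw [pvMaxw_acc rs (max 0 r.length)]
    set W := rs.foldl (fun w row => max w row.length) 0 with hW
    have hNsplit : pvDownB (r :: rs) (max (max 0 r.length) W)
        = max (pvDownB [r] (max (max 0 r.length) W)) (pvDownB rs (max (max 0 r.length) W)) :=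
      pvDownB_cons r rs _
    have h1 : pvDownB [r] (max (max 0 r.length) W) = pvDownB [r] r.length := by
      apply pvDownB_ext _ _ ?_ _ (by omega)
      intro c hc
      apply pvPopB_false_of_short
      intro row hrow
      simp at hrow; subst hrow; omega
    have h2 : pvDownB rs (max (max 0 r.length) W) = pvDownB rs W := by
      apply pvDownB_ext _ _ ?_ _ (by omega)
      intro c hc
      apply pvPopB_false_of_short
      intro row hrow
      have := pvLen_le_maxw rs row hrow
      omega
    rw [hNsplit, h1, h2]
    omega

-- ===== VERDICT (by name: the statement is the Claim_ definition above) =====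
theorem max_populated_col_py_spec : Claim_equal_max_populated_col_py := by
  intro rows _
  unfold Spec_max_populated_col_py max_populated_col_py
  rw [pvMain rows 0 le_rfl]
  have : 0 ≤ max_populated_col_py_alt rows := by
    unfold max_populated_col_py_alt; exact pvDownB_nonneg _ _
  omega
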